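-- pv_equiv track=rewrite | github.com/aliSamawi/xor-for-contiguous-subset | xor_contiguous_subset.py | calculate_xor
-- ===== SOURCE A (Python) =====
-- def calculate_xor(num_array: list):
--     result = 0
--     length = len(num_array)
--     for i in range(length):
--         index = i + 1 # get the position of element which ignored in pseducode
--         p = index * (length - index + 1) # calculate the iteration of element in contiguous subsets
--         if p % 2 == 1:
--             result = result ^ num_array[i]
--     return result
-- ===== SOURCE B (Python) =====
-- def calculate_xor(num_array: list):
--     # (i+1)*(len-i) is odd only when len is odd and i is even,
--     # so: even length -> 0; odd length -> XOR of the even-index elements.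
--     length = len(num_array)
--     if length % 2 == 0:
--         return 0
--     result = 0
--     for i in range(0, length, 2):
--         result = result ^ num_array[i]
--     return result
-- ===== Notes on version B (the rewrite author's own statement) =====
-- stated objective: simpler
-- what changed: Replaces the per-index multiply-and-parity test with a single length-parity check (even length returns 0 immediately) plus a strided XOR over the even indices only.
import Mathlib
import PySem

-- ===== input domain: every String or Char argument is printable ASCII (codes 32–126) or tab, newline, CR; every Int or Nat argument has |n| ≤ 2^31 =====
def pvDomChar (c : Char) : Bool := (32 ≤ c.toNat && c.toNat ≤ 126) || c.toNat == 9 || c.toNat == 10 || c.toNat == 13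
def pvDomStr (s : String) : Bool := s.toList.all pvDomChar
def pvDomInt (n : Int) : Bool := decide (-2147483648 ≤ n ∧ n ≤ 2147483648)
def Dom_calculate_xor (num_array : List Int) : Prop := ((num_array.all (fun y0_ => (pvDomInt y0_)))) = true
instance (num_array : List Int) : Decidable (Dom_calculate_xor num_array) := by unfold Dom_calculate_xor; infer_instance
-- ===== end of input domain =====

-- B replaces A's per-index multiply-and-parity test with a length-parity check plus a strided XOR over even indices (simpler).


-- ===== PORT A =====
-- locals `index` and `p` of A are inlined into the condition, otherwise step for step
def calculate_xor (num_array : List Int) : Int :=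
  (PySem.List.pyRange 0 (num_array.length : Int) 1).foldl
    (fun result i =>
      if PySem.Int.mod ((i + 1) * ((num_array.length : Int) - (i + 1) + 1)) 2 = 1
      then PySem.Int.bxor result (PySem.List.pyGetD num_array i 0)
      else result) 0

-- ===== PORT B =====
def calculate_xor_alt (num_array : List Int) : Int :=
  if PySem.Int.mod (num_array.length : Int) 2 = 0 then 0
  else (PySem.List.pyRange 0 (num_array.length : Int) 2).foldl
    (fun result i => PySem.Int.bxor result (PySem.List.pyGetD num_array i 0)) 0

-- ===== PRECONDITION & SPEC =====
def Spec_calculate_xor (num_array : List Int) (out : Int) : Prop := out = calculate_xor_alt num_array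
instance (num_array : List Int) (out : Int) : Decidable (Spec_calculate_xor num_array out) := by unfold Spec_calculate_xor; infer_instance

-- ===== CLAIM (what is proved, stated in full; the proofs are below) =====
def Claim_equal_calculate_xor : Prop := ∀ (num_array : List Int), Dom_calculate_xor num_array → Spec_calculate_xor num_array (calculate_xor num_array)

-- ===== LEMMAS AND PROOFS =====

-- p = (k+1)*(n-k) is odd exactly when n is odd and k is even
lemma parity_cond (n k : Nat) (hk : k < n) :
    ((k + 1) * (n - k)) % 2 = 1 ↔ (n % 2 = 1 ∧ k % 2 = 0) := by
  rw [Nat.mul_mod]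
  rcases Nat.mod_two_eq_zero_or_one k with hk2 | hk2 <;>
    rcases Nat.mod_two_eq_zero_or_one n with hn2 | hn2 <;>
    · have h1 : (k + 1) % 2 = 1 - k % 2 := by omega
      have h2 : (n - k) % 2 = (n % 2 + 2 - k % 2) % 2 := by omega
      rw [h1, h2, hk2, hn2]
      norm_num

-- A's product, cast to Nat arithmetic (valid since k < n)
lemma prod_cast (n k : Nat) (hk : k < n) :
    ((k : Int) + 1) * ((n : Int) - ((k : Int) + 1) + 1) = (((k + 1) * (n - k) : Nat) : Int) := by
  have h : ((n - k : Nat) : Int) = (n : Int) - (k : Int) := by omega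
  push_cast [h]
  ring

-- A's branch condition, as a statement about k and n
lemma cond_iff (n k : Nat) (hk : k < n) :
    (PySem.Int.mod (((k : Int) + 1) * ((n : Int) - ((k : Int) + 1) + 1)) 2 = 1)
      ↔ (n % 2 = 1 ∧ k % 2 = 0) := by
  rw [prod_cast n k hk, show ((2 : Int)) = ((2 : Nat) : Int) from rfl, PySem.Int.mod_natCast,
    show ((1 : Int)) = ((1 : Nat) : Int) from rfl, Nat.cast_inj]
  exact parity_cond n k hk

-- the even indices of range n, as a step-2 list
lemma range_filter_even (n : Nat) :
    (List.range n).filter (fun k => k % 2 == 0) =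
      (List.range ((n + 1) / 2)).map (fun j => 2 * j) := by
  induction n with
  | zero => simp
  | succ n ih =>
    rw [List.range_succ, List.filter_append, ih]
    by_cases h : n % 2 = 0
    · have h2 : (n + 1 + 1) / 2 = (n + 1) / 2 + 1 := by omega
      rw [h2, List.range_succ, List.map_append]
      have h3 : 2 * ((n + 1) / 2) = n := by omega
      simp [h, h3]
    · have h2 : (n + 1 + 1) / 2 = (n + 1) / 2 := by omega
      have h1 : n % 2 = 1 := by omega
      simp [h2, h1]

lemma foldl_keep {α β : Type} (l : List α) (a : β) : l.foldl (fun r _ => r) a = a := by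
  induction l generalizing a with
  | nil => rfl
  | cons x t ih => simp [ih a]

theorem calculate_xor_spec : Claim_equal_calculate_xor := by
  intro xs _
  unfold Spec_calculate_xor calculate_xor calculate_xor_alt
  set n := xs.length with hn
  rw [PySem.List.pyRange_zero_natCast, List.foldl_map]
  by_cases hpar : n % 2 = 0
  · -- even length: every condition of A is false, B returns 0 at once
    have hB : PySem.Int.mod ((n : Nat) : Int) 2 = 0 := by
      rw [show ((2 : Int)) = ((2 : Nat) : Int) from rfl, PySem.Int.mod_natCast, hpar]; rfl
    rw [if_pos hB]
    rw [PySem.List.foldl_congr_mem _ _ (fun r (_ : Nat) => r) 0 ?_, foldl_keep]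
    intro acc k hk
    have hklt : k < n := List.mem_range.mp hk
    rw [if_neg]
    rw [cond_iff n k hklt]
    omega
  · -- odd length: A keeps exactly the even indices = B's step-2 range
    have hB : ¬ PySem.Int.mod ((n : Nat) : Int) 2 = 0 := by
      rw [show ((2 : Int)) = ((2 : Nat) : Int) from rfl, PySem.Int.mod_natCast]
      intro h
      exact hpar (by exact_mod_cast h)
    rw [if_neg hB]
    rw [PySem.List.foldl_congr_mem _ _
      (fun r (k : Nat) => if (fun k => k % 2 == 0) k = true
        then PySem.Int.bxor r (PySem.List.pyGetD xs (k : Int) 0) else r) 0 ?_]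
    · rw [← List.foldl_filter, range_filter_even, List.foldl_map]
      rw [PySem.List.pyRange_of_pos 0 ((n : Nat) : Int) (by norm_num : (0:Int) < 2)]
      rw [if_pos (by exact_mod_cast (by omega : 0 < n))]
      rw [List.foldl_map]
      have hm : ((((n : Nat) : Int) - 0 + 2 - 1) / 2).toNat = (n + 1) / 2 := by
        have h1 : (((n : Nat) : Int) - 0 + 2 - 1) = (((n + 1 : Nat)) : Int) := by push_cast; ring
        rw [h1, show ((2 : Int)) = ((2 : Nat) : Int) from rfl, ← Int.natCast_div]
        exact Int.toNat_natCast _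
      rw [hm]
      apply PySem.List.foldl_congr_mem
      intro acc j _
      have h2 : ((2 * j : Nat) : Int) = 0 + 2 * (j : Int) := by push_cast; ring
      rw [h2]
    · intro acc k hk
      have hklt : k < n := List.mem_range.mp hk
      refine if_congr ?_ rfl rfl
      rw [cond_iff n k hklt]
      simp only [beq_iff_eq]
      omega

-- ===== VERDICT: the theorem above proves Claim_equal_calculate_xor by name =====
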